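-- pv_equiv track=rewrite | github.com/jonDomino/nba_scanner | data_build/orderbook_snapshot.py | get_no_bid_top_and_liquidity
-- ===== SOURCE A (Python) =====
-- from typing import Dict, Any, Optional, Literal, Tuple
--
-- def get_no_bid_top_and_liquidity(orderbook: Dict[str, Any]) -> Tuple[Optional[int], Optional[int], Dict[int, int]]:
--     """
--     Extract top NO bid price and its liquidity from orderbook.
--
--     Args:
--         orderbook: Kalshi orderbook dict with "no" bid array
--
--     Returns:
--         (no_bid_top_c, no_bid_top_liq, no_bids_by_price_dict)
--     """
--     no_bids = orderbook.get("no") or []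
--
--     if not no_bids or not isinstance(no_bids, list):
--         return (None, None, {})
--
--     no_bid_top_c = None
--     no_bids_by_price = {}
--
--     for bid in no_bids:
--         if isinstance(bid, list) and len(bid) >= 2:
--             price_cents = int(bid[0])
--             qty = int(bid[1])
--
--             if no_bid_top_c is None or price_cents > no_bid_top_c:
--                 no_bid_top_c = price_cents
--
--             if price_cents in no_bids_by_price:
--                 no_bids_by_price[price_cents] += qty
--             else:
--                 no_bids_by_price[price_cents] = qty
--
--     no_bid_top_liq = no_bids_by_price.get(no_bid_top_c, 0) if no_bid_top_c is not None else None
--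
--     return (no_bid_top_c, no_bid_top_liq, no_bids_by_price)
-- ===== SOURCE B (Python) =====
-- def get_no_bid_top_and_liquidity(orderbook):
--     """Same result as A, without a dict during aggregation: collect the valid
--     (price, qty) pairs, dedup the prices in first-occurrence order, compute each
--     price's total by a scan over the pairs, take max() over the price list, and
--     only at the end zip the parallel lists into the returned dict."""
--     no_bids = orderbook.get("no") or []
--     if not isinstance(no_bids, list):
--         return (None, None, {})
--     pairs = [(int(b[0]), int(b[1])) for b in no_bids
--              if isinstance(b, list) and len(b) >= 2]
--     prices = []
--     for p, _ in pairs: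
--         if p not in prices:
--             prices.append(p)
--     if not prices:
--         return (None, None, {})
--     totals = [sum(q for pp, q in pairs if pp == p) for p in prices]
--     top = max(prices)
--     liq = sum(q for pp, q in pairs if pp == top)
--     return (top, liq, dict(zip(prices, totals)))
-- ===== Notes on version B (the rewrite author's own statement) =====
-- stated objective: alternative
-- what changed: B uses no dict and no running state: it extracts the valid pairs, deduplicates prices in first-occurrence order, computes each price's total (and the top price's liquidity) by separate scans over the pairs, takes max() over the price list afterwards, and builds the returned dict only at the end by zipping the parallel price/total lists; A is a single stateful loop maintaining a running max and an accumulating dict.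
import Mathlib
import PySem

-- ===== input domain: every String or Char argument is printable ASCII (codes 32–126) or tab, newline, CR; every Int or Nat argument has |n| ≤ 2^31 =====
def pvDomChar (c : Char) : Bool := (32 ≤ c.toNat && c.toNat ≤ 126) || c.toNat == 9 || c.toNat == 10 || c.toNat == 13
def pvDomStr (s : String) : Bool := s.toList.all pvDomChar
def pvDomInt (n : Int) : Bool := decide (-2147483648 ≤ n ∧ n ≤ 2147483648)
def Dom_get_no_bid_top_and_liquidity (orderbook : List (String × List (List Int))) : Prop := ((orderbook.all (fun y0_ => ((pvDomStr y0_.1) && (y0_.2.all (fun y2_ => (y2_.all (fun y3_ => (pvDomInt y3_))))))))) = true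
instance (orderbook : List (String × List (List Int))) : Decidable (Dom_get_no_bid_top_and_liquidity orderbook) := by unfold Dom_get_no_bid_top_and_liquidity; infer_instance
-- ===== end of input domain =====

-- B drops A's stateful loop (running max + accumulating dict) for staged scans: dedup the
-- prices, sum each price's quantities by a scan, max() afterwards, zip the dict at the end.
-- Same result, no speed claim. Equivalence of the RETURN value is what is proved.

-- ===== PORT A =====
-- orderbook.get("no"): first matching key of the association list, default [] (also the value
-- of 'or []' on a missing/empty entry); keys compared on the character-list side (kernel-fast, exact)
def pvGetNo : List (String × List (List Int)) → List (List Int)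
  | [] => []
  | (k, v) :: rest => if k.toList = "no".toList then v else pvGetNo rest

-- loop body of A: running max in .1, aggregation dict in .2; bids without two elements are skipped
def pvStepA (st : Option Int × PySem.Dict Int Int) (bid : List Int) : Option Int × PySem.Dict Int Int :=
  match bid with
  | p :: q :: _ =>
    let top : Option Int :=
      match st.1 with
      | none => some p
      | some t => if p > t then some p else some t
    let d :=
      if st.2.contains p then st.2.insert p (st.2.getD p 0 + q)
      else st.2.insert p q
    (top, d)
  | _ => st

def get_no_bid_top_and_liquidity (orderbook : List (String × List (List Int))) : Option Int × Option Int × (List (Int × Int)) :=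
  let no_bids := pvGetNo orderbook
  if no_bids = [] then (none, none, [])
  else
    let st := no_bids.foldl pvStepA (none, PySem.Dict.empty)
    match st.1 with
    | none => (none, none, st.2.items)
    | some t => (some t, some (st.2.getD t 0), st.2.items)

-- ===== PORT B =====
-- sum(q for pp, q in pairs if pp == p)
def pvSumFor (pairs : List (Int × Int)) (p : Int) : Int :=
  ((pairs.filter (fun pq => pq.1 == p)).map Prod.snd).sum

def get_no_bid_top_and_liquidity_alt (orderbook : List (String × List (List Int))) : Option Int × Option Int × (List (Int × Int)) :=
  let no_bids := pvGetNo orderbook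
  let pairs := (no_bids.filter (fun b => decide (2 ≤ b.length))).map (fun b => (b.headI, b.tail.headI))
  -- the 'if p not in prices: prices.append(p)' loop is first-occurrence dedup = PySem.Set.ofList
  let prices : List Int := PySem.Set.ofList (pairs.map Prod.fst)
  if prices = [] then (none, none, [])
  else
    let totals := prices.map (pvSumFor pairs)
    -- max(prices) on a nonempty list; the none arm is unreachable
    match PySem.List.max? prices (fun x => x) with
    | none => (none, none, prices.zip totals)
    | some t =>
      -- dict(zip(prices, totals)) over distinct keys in order IS this association list (exact)
      (some t, some (pvSumFor pairs t), prices.zip totals)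

-- ===== PRECONDITION & SPEC =====
def Spec_get_no_bid_top_and_liquidity (orderbook : List (String × List (List Int))) (out : Option Int × Option Int × (List (Int × Int))) : Prop := out = get_no_bid_top_and_liquidity_alt orderbook
instance (orderbook : List (String × List (List Int))) (out : Option Int × Option Int × (List (Int × Int))) : Decidable (Spec_get_no_bid_top_and_liquidity orderbook out) := by unfold Spec_get_no_bid_top_and_liquidity; infer_instance

-- ===== CLAIM (what is proved, stated in full; the proofs are below) =====
def Claim_equal_get_no_bid_top_and_liquidity : Prop := ∀ (orderbook : List (String × List (List Int))), Dom_get_no_bid_top_and_liquidity orderbook → Spec_get_no_bid_top_and_liquidity orderbook (get_no_bid_top_and_liquidity orderbook)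

-- ===== LEMMAS AND PROOFS =====

-- the dict update of A's loop body, as a function of the extracted (price, qty) pair
def pvStepB (d : PySem.Dict Int Int) (pq : Int × Int) : PySem.Dict Int Int :=
  d.insert pq.1 (d.getD pq.1 0 + pq.2)

-- A's dict update on a valid bid is pvStepB
theorem pvStep_dict_eq (st : Option Int × PySem.Dict Int Int) (p q : Int) (rest : List Int) :
    (pvStepA st (p :: q :: rest)).2 = pvStepB st.2 (p, q) := by
  simp only [pvStepA, pvStepB]
  by_cases h : st.2.contains p
  · simp [h]
  · simp [h, PySem.Dict.getD_of_not_contains st.2 (0 : Int) (by simpa using h)]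

-- the dict built by A's loop is a pvStepB-fold over the extracted pairs
theorem pv_dict_eq (bids : List (List Int)) :
    ∀ (t : Option Int) (d : PySem.Dict Int Int),
      (bids.foldl pvStepA (t, d)).2
        = ((bids.filter (fun b => decide (2 ≤ b.length))).map (fun b => (b.headI, b.tail.headI))).foldl pvStepB d := by
  induction bids with
  | nil => intro t d; rfl
  | cons b bs ih =>
    intro t d
    match b with
    | [] => simpa using ih t d
    | [p] => simpa using ih t d
    | p :: q :: rest =>
      have h2 : List.filter (fun b => decide (2 ≤ b.length)) ((p :: q :: rest) :: bs)
          = (p :: q :: rest) :: List.filter (fun b => decide (2 ≤ b.length)) bs := by simp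
      rw [List.foldl_cons, h2, List.map_cons, List.foldl_cons]
      show (List.foldl pvStepA (pvStepA (t, d) (p :: q :: rest)) bs).2
          = List.foldl pvStepB (pvStepB d (p, q))
              ((bs.filter (fun b => decide (2 ≤ b.length))).map (fun b => (b.headI, b.tail.headI)))
      rw [← pvStep_dict_eq (t, d) p q rest]
      exact ih (pvStepA (t, d) (p :: q :: rest)).1 (pvStepA (t, d) (p :: q :: rest)).2

-- max of l ++ [p] in terms of max of l
theorem pv_max?_append_singleton (l : List Int) (p : Int) :
    PySem.List.max? (l ++ [p]) (fun x => x)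
      = some (match PySem.List.max? l (fun x => x) with | none => p | some m => max m p) := by
  cases l with
  | nil =>
    show PySem.List.max? [p] (fun x => x) = _
    rw [PySem.List.max?_id_cons]
    rfl
  | cons x t =>
    rw [List.cons_append, PySem.List.max?_id_cons, PySem.List.max?_id_cons]
    simp [List.foldl_append]

-- A's running max is the max of the keys of A's dict, all along the loop
theorem pv_top_inv (bids : List (List Int)) :
    ∀ (t : Option Int) (d : PySem.Dict Int Int),
      d.keys.Nodup → t = PySem.List.max? d.keys (fun x => x) →
      (bids.foldl pvStepA (t, d)).1
        = PySem.List.max? ((bids.foldl pvStepA (t, d)).2).keys (fun x => x) := by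
  induction bids with
  | nil => intro t d _ h; simpa using h
  | cons b bs ih =>
    intro t d hnd ht
    match b with
    | [] => exact ih t d hnd ht
    | [p] => exact ih t d hnd ht
    | p :: q :: rest =>
      rw [List.foldl_cons]
      by_cases hc : d.contains p
      · have hkeys : (d.insert p (d.getD p 0 + q)).keys = d.keys :=
          PySem.Dict.keys_insert_of_contains d _ hc
        have hp : p ∈ d.keys := (PySem.Dict.contains_iff_mem_keys d p).mp hc
        cases t with
        | none =>
          exfalso
          have : d.keys = [] := (PySem.List.max?_eq_none_iff d.keys _).mp ht.symm
          simp [this] at hp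
        | some m =>
          have hmax : ∀ y ∈ d.keys, y ≤ m := by
            intro y hy
            simpa using PySem.List.max?_isMax (xs := d.keys) (key := fun x => x) (m := m)
              ht.symm y hy
          have hpm : ¬ p > m := not_lt.mpr (hmax p hp)
          have hstep : pvStepA (some m, d) (p :: q :: rest)
              = (some m, d.insert p (d.getD p 0 + q)) := by
            simp [pvStepA, hpm, hc]
          rw [hstep]
          exact ih (some m) _ (by rw [hkeys]; exact hnd) (by rw [hkeys]; exact ht)
      · have hcf : d.contains p = false := by simpa using hc
        have hkeys : (d.insert p q).keys = d.keys ++ [p] :=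
          PySem.Dict.keys_insert_of_not_contains d q hcf
        have hnd' : (d.insert p q).keys.Nodup := by
          rw [hkeys]
          refine List.Nodup.append hnd (List.nodup_singleton p) ?_
          intro a ha hb
          have : a = p := by simpa using hb
          subst this
          exact hc ((PySem.Dict.contains_iff_mem_keys d a).mpr ha)
        have hmaxk : PySem.List.max? (d.insert p q).keys (fun x => x)
            = some (match PySem.List.max? d.keys (fun x => x) with | none => p | some m => max m p) := by
          rw [hkeys]; exact pv_max?_append_singleton d.keys p
        cases t with
        | none =>
          have hstep : pvStepA (none, d) (p :: q :: rest) = (some p, d.insert p q) := by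
            simp [pvStepA, hc]
          rw [hstep]
          refine ih (some p) _ hnd' ?_
          rw [hmaxk, ← ht]
        | some m =>
          by_cases hpm : p > m
          · have hstep : pvStepA (some m, d) (p :: q :: rest) = (some p, d.insert p q) := by
              simp [pvStepA, hpm, hc]
            rw [hstep]
            refine ih (some p) _ hnd' ?_
            rw [hmaxk, ← ht]
            simp [max_eq_right (le_of_lt hpm)]
          · have hstep : pvStepA (some m, d) (p :: q :: rest) = (some m, d.insert p q) := by
              simp [pvStepA, hpm, hc]
            rw [hstep]
            refine ih (some m) _ hnd' ?_
            rw [hmaxk, ← ht]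
            simp [max_eq_left (not_lt.mp hpm)]

-- keys of the pvStepB-fold: first occurrences of the prices, in order
theorem pv_keys_fold (pairs : List (Int × Int)) :
    (pairs.foldl pvStepB PySem.Dict.empty).keys = PySem.Set.ofList (pairs.map Prod.fst) := by
  have h := PySem.Dict.keys_foldl_insert_key (l := pairs) (key := Prod.fst)
    (f := fun d pq => d.getD pq.1 0 + pq.2) (d := PySem.Dict.empty)
  simpa [pvStepB, PySem.Set.update_nil_left] using h

theorem pv_nodup_keys_fold (pairs : List (Int × Int)) :
    (pairs.foldl pvStepB PySem.Dict.empty).keys.Nodup := by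
  rw [pv_keys_fold]; exact PySem.Set.nodup_ofList _

-- value of the pvStepB-fold at any key: the base value plus the sum over matching pairs
theorem pv_getD_fold (pairs : List (Int × Int)) :
    ∀ (d : PySem.Dict Int Int) (c : Int),
      (pairs.foldl pvStepB d).getD c 0 = d.getD c 0 + pvSumFor pairs c := by
  induction pairs with
  | nil => intro d c; simp [pvSumFor]
  | cons pq rest ih =>
    intro d c
    rw [List.foldl_cons, ih]
    by_cases h : pq.1 = c
    · simp [pvStepB, pvSumFor, h]
      ring
    · simp [pvStepB, pvSumFor, PySem.Dict.getD_insert, h, Ne.symm h]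

-- zipping a list with its own map is mapping to pairs
theorem pv_zip_map {α β : Type} (l : List α) (f : α → β) :
    l.zip (l.map f) = l.map (fun a => (a, f a)) := by
  induction l with
  | nil => rfl
  | cons x t ih => simp [ih]

-- ===== VERDICT (by name: the statement is the Claim_ definition above) =====
theorem get_no_bid_top_and_liquidity_spec : Claim_equal_get_no_bid_top_and_liquidity := by
  intro orderbook _
  unfold Spec_get_no_bid_top_and_liquidity
  unfold get_no_bid_top_and_liquidity get_no_bid_top_and_liquidity_alt
  set nb := pvGetNo orderbook with hnb
  by_cases h : nb = []
  · rw [h]; rfl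
  · simp only [h, if_false]
    set pairs := (nb.filter (fun b => decide (2 ≤ b.length))).map (fun b => (b.headI, b.tail.headI)) with hpairs
    have hd := pv_dict_eq nb none PySem.Dict.empty
    have ht := pv_top_inv nb none PySem.Dict.empty PySem.Dict.nodup_keys_empty rfl
    set st := nb.foldl pvStepA (none, PySem.Dict.empty) with hst
    have hkeys : st.2.keys = PySem.Set.ofList (pairs.map Prod.fst) := by
      rw [hd]; exact pv_keys_fold pairs
    have hnd : st.2.keys.Nodup := by rw [hd]; exact pv_nodup_keys_fold pairs
    have hgd : ∀ c, st.2.getD c 0 = pvSumFor pairs c := by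
      intro c; rw [hd, pv_getD_fold]; simp only [PySem.Dict.getD_empty, zero_add]; rw [← hpairs]
    have hitems : st.2.items
        = (PySem.Set.ofList (pairs.map Prod.fst)).map (fun p => (p, pvSumFor pairs p)) := by
      rw [PySem.Dict.items_eq_map_keys st.2 hnd 0, hkeys]
      exact List.map_congr_left (fun p _ => by rw [hgd p])
    have hzip : (PySem.Set.ofList (pairs.map Prod.fst)).zip
        ((PySem.Set.ofList (pairs.map Prod.fst) : List Int).map (pvSumFor pairs))
        = (PySem.Set.ofList (pairs.map Prod.fst)).map (fun p => (p, pvSumFor pairs p)) :=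
      pv_zip_map _ _
    have htop : st.1 = PySem.List.max? (PySem.Set.ofList (pairs.map Prod.fst)) (fun x => x) := by
      rw [ht, hkeys]
    by_cases hp : (PySem.Set.ofList (pairs.map Prod.fst) : List Int) = []
    · -- no valid bid: A's dict is empty, its running max is none
      have h1 : st.1 = none := by
        rw [htop, hp]; rfl
      have hi : st.2.items = [] := by rw [hitems, hp]; rfl
      simp only [hp, if_pos, h1, hi]
    · simp only [hp, if_false]
      obtain ⟨t, htm⟩ : ∃ t, PySem.List.max? (PySem.Set.ofList (pairs.map Prod.fst)) (fun x => x) = some t := by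
        cases hm : PySem.List.max? (PySem.Set.ofList (pairs.map Prod.fst)) (fun x => x) with
        | none => exact absurd ((PySem.List.max?_eq_none_iff _ _).mp hm) hp
        | some t => exact ⟨t, rfl⟩
      rw [htm] at htop
      simp only [htm, htop, hitems, hzip, hgd t]
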